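-- pv_equiv track=rewrite | github.com/tlettsilveiro1/Estructura-de-Datos | practica2b-pilas-y-colas/ejercicio6.py | sublista_consecutivos_mas_larga
-- ===== SOURCE A (Python) =====
-- def sublista_consecutivos_mas_larga(lista):
--     if len(lista) == 0:
--         return []
--
--     sublista_actual = [lista[0]]   # primera sublista
--     sublista_mas_larga = [lista[0]]
--
--     # recorrer desde el segundo elemento
--     for i in range(1, len(lista)):
--         if lista[i] == lista[i - 1] + 1:
--             # si es consecutivo, agregar a la sublista actual
--             sublista_actual.append(lista[i])
--         else:
--             # si no es consecutivo, reiniciar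
--             if len(sublista_actual) > len(sublista_mas_larga):
--                 sublista_mas_larga = sublista_actual
--             sublista_actual = [lista[i]]
--
--     # última comparación fuera del bucle
--     if len(sublista_actual) > len(sublista_mas_larga):
--         sublista_mas_larga = sublista_actual
--
--     return sublista_mas_larga
-- ===== SOURCE B (Python) =====
-- def sublista_consecutivos_mas_larga(lista):
--     # Split into maximal consecutive runs, then pick the first longest run.
--     runs = []
--     i = 0
--     n = len(lista)
--     while i < n:
--         j = i + 1
--         while j < n and lista[j] == lista[j - 1] + 1:
--             j += 1
--         runs.append(lista[i:j])
--         i = j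
--     best = []
--     for r in runs:
--         if len(r) > len(best):
--             best = r
--     return best
-- ===== Notes on version B (the rewrite author's own statement) =====
-- stated objective: alternative
-- what changed: B first decomposes the list into its maximal consecutive runs (segment boundaries) and then scans the run list once for the first longest run, instead of A's element-by-element state machine carrying a current and best sublist.
import Mathlib
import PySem

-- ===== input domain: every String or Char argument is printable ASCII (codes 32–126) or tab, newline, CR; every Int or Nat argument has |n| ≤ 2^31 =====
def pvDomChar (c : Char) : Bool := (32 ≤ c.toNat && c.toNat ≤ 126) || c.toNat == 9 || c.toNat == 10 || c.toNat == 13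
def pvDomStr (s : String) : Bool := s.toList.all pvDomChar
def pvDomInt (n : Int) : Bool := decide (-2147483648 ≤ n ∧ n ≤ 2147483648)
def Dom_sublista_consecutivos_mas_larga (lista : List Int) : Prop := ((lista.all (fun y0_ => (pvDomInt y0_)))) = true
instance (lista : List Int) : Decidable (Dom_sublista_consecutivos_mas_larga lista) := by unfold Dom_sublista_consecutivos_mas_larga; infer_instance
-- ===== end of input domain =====

-- B decomposes the list into maximal consecutive runs and picks the first longest; A is an element-by-element scan (objective: alternative decomposition).

-- ===== PORT A =====
-- loop of A: prev is lista[i-1], cur/best are sublista_actual/sublista_mas_larga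
def pvLoopA (prev : Int) (rest : List Int) (cur best : List Int) : List Int :=
  match rest with
  | [] => if cur.length > best.length then cur else best
  | x :: xs =>
    if x = prev + 1 then pvLoopA x xs (cur ++ [x]) best
    else pvLoopA x xs [x] (if cur.length > best.length then cur else best)

def sublista_consecutivos_mas_larga (lista : List Int) : List Int :=
  match lista with
  | [] => []
  | x :: xs => pvLoopA x xs [x] [x]

-- ===== PORT B =====
-- inner while of B: extend the run while consecutive; returns (run continuation, remainder)
def pvTakeRun (prev : Int) (l : List Int) : List Int × List Int :=
  match l with
  | [] => ([], [])
  | x :: xs =>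
    if x = prev + 1 then
      let (r, rest) := pvTakeRun x xs
      (x :: r, rest)
    else ([], x :: xs)

theorem pvTakeRun_snd_le (prev : Int) (l : List Int) : (pvTakeRun prev l).2.length ≤ l.length := by
  induction l generalizing prev with
  | nil => simp [pvTakeRun]
  | cons x xs ih =>
    simp only [pvTakeRun]
    split
    · exact le_trans (ih x) (Nat.le_succ _)
    · simp

-- outer while of B: build the list of maximal consecutive runs
def pvRuns (l : List Int) : List (List Int) :=
  match l with
  | [] => []
  | x :: xs =>
    (x :: (pvTakeRun x xs).1) :: pvRuns (pvTakeRun x xs).2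
termination_by l.length
decreasing_by
  simp only [List.length_cons]
  exact Nat.lt_succ_of_le (pvTakeRun_snd_le x xs)

def sublista_consecutivos_mas_larga_alt (lista : List Int) : List Int :=
  (pvRuns lista).foldl (fun b r => if r.length > b.length then r else b) []

-- ===== PRECONDITION & SPEC =====
def Spec_sublista_consecutivos_mas_larga (lista : List Int) (out : List Int) : Prop := out = sublista_consecutivos_mas_larga_alt lista
instance (lista : List Int) (out : List Int) : Decidable (Spec_sublista_consecutivos_mas_larga lista out) := by unfold Spec_sublista_consecutivos_mas_larga; infer_instance

-- ===== CLAIM (what is proved, stated in full; the proofs are below) =====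
def Claim_equal_sublista_consecutivos_mas_larga : Prop := ∀ (lista : List Int), Dom_sublista_consecutivos_mas_larga lista → Spec_sublista_consecutivos_mas_larga lista (sublista_consecutivos_mas_larga lista)

-- ===== LEMMAS AND PROOFS =====

-- A's loop, run to the end of the current run and folded over the remaining runs
theorem pvLoopA_eq (l : List Int) (prev : Int) (cur best : List Int) :
    pvLoopA prev l cur best =
      ((pvRuns (pvTakeRun prev l).2).foldl (fun b r => if r.length > b.length then r else b)
        (if (cur ++ (pvTakeRun prev l).1).length > best.length then cur ++ (pvTakeRun prev l).1 else best)) := by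
  induction l generalizing prev cur best with
  | nil => simp [pvLoopA, pvTakeRun, pvRuns]
  | cons x xs ih =>
    simp only [pvLoopA, pvTakeRun]
    by_cases h : x = prev + 1
    · simp only [if_pos h]
      rw [ih x (cur ++ [x]) best]
      simp
    · simp only [if_neg h]
      rw [ih x [x] (if cur.length > best.length then cur else best)]
      rw [pvRuns]
      simp [List.foldl_cons]

theorem sublista_consecutivos_mas_larga_eq (lista : List Int) :
    sublista_consecutivos_mas_larga lista = sublista_consecutivos_mas_larga_alt lista := by
  cases lista with
  | nil => simp [sublista_consecutivos_mas_larga, sublista_consecutivos_mas_larga_alt, pvRuns]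
  | cons x xs =>
    simp only [sublista_consecutivos_mas_larga, sublista_consecutivos_mas_larga_alt]
    rw [pvLoopA_eq, pvRuns]
    simp only [List.foldl_cons]
    congr 1
    simp

-- ===== VERDICT (by name: the statement is the Claim_ definition above) =====
theorem sublista_consecutivos_mas_larga_spec : Claim_equal_sublista_consecutivos_mas_larga := by
  intro lista _
  exact sublista_consecutivos_mas_larga_eq lista
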